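-- pv_equiv track=rewrite | github.com/nickeddale/survey-tool | backend/app/services/expressions/piping.py | _scan_placeholders
-- ===== SOURCE A (Python) =====
-- from typing import Any, Dict, List, Optional, Tuple
--
-- def _scan_placeholders(text: str) -> List[Tuple[int, int, str]]:
--     """Return a list of (start, end, inner_content) tuples for all unescaped placeholders.
--
--     Handles nested braces correctly by tracking brace depth, so
--     ``{count({Q_multi})}`` is treated as a single placeholder with inner
--     content ``count({Q_multi})``.
--
--     A brace that is preceded by a backslash (``\\{`` or ``\\}``) is treated
--     as escaped and skipped — it will be converted to a literal brace after
--     substitution.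
--
--     Args:
--         text: The template string to scan.
--
--     Returns:
--         A list of (start, end, inner) tuples where *start* is the index of
--         the opening ``{``, *end* is the index one past the closing ``}``, and
--         *inner* is the text between the outer braces.
--     """
--     results: List[Tuple[int, int, str]] = []
--     i = 0
--     n = len(text)
--     while i < n:
--         ch = text[i]
--         if ch == "\\" and i + 1 < n and text[i + 1] in ("{", "}"):
--             # Escaped brace — skip both characters.
--             i += 2
--             continue
--         if ch == "{":
--             # Start of a potential placeholder.
--             depth = 1
--             j = i + 1
--             while j < n and depth > 0:
--                 if text[j] == "\\" and j + 1 < n and text[j + 1] in ("{", "}"):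
--                     j += 2
--                     continue
--                 if text[j] == "{":
--                     depth += 1
--                 elif text[j] == "}":
--                     depth -= 1
--                 j += 1
--             if depth == 0:
--                 # j is now one past the closing '}'.
--                 inner = text[i + 1 : j - 1]
--                 results.append((i, j, inner))
--                 i = j
--                 continue
--         i += 1
--     return results
-- ===== SOURCE B (Python) =====
-- def _scan_placeholders(text):
--     """Single-pass scan: a stack of open-brace positions finds matches;
--     a result stack keeps only the outermost matched pairs."""
--     results = []
--     stack = []
--     i = 0
--     n = len(text)
--     while i < n:
--         ch = text[i]
--         if ch == "\\" and i + 1 < n and text[i + 1] in ("{", "}"):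
--             i += 2
--             continue
--         if ch == "{":
--             stack.append(i)
--         elif ch == "}" and stack:
--             p = stack.pop()
--             while results and results[-1][0] > p:
--                 results.pop()
--             results.append((p, i + 1, text[p + 1 : i]))
--         i += 1
--     return results
-- ===== Notes on version B (the rewrite author's own statement) =====
-- stated objective: alternative
-- what changed: A rescans from every open brace with a depth counter (restarting after each unmatched open); B makes a single left-to-right pass with a stack of open-brace positions and a result stack from which pairs enclosed by a later-closed outer pair are popped.
import Mathlib
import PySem

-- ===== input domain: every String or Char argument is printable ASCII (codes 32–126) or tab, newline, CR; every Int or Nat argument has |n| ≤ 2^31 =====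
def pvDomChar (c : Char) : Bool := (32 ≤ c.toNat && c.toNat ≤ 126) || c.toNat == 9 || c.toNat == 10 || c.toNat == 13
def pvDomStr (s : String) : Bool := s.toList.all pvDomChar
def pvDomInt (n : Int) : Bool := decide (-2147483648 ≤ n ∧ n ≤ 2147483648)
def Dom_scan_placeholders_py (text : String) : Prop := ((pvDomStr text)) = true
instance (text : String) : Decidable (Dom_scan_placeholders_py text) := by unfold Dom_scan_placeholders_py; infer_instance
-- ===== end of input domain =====

-- B replaces A's rescan-on-every-open-brace with a single pass over the text keeping a stack of
-- open-brace positions and a result stack of outermost matched pairs (objective: alternative algorithm).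

-- ===== PORT A =====
-- shared one-liner for Python's `text[i] == "\\" and i + 1 < n and text[i+1] in ("{", "}")`
def pvEscAt (t : List Char) (n i : Nat) : Bool :=
  t.getD i ' ' == '\\' && decide (i + 1 < n) && (t.getD (i+1) ' ' == '{' || t.getD (i+1) ' ' == '}')

-- A's inner `while j < n and depth > 0` loop; `some j` = loop left with depth == 0 at index j,
-- `none` = loop ran off the end with depth > 0.  fuel ≥ n - j + 1 is always enough (j grows each step).
def pvInnerA (t : List Char) (n : Nat) : Nat → Nat → Nat → Option Nat
  | 0, _, _ => none
  | fuel+1, j, depth =>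
    if j < n ∧ 0 < depth then
      if pvEscAt t n j then pvInnerA t n fuel (j+2) depth
      else if t.getD j ' ' = '{' then pvInnerA t n fuel (j+1) (depth+1)
      else if t.getD j ' ' = '}' then pvInnerA t n fuel (j+1) (depth-1)
      else pvInnerA t n fuel (j+1) depth
    else if depth = 0 then some j else none

-- A's outer `while i < n` loop (fuel-indexed; i grows each step, so fuel n+1 from i = 0 suffices)
def pvMainA (t : List Char) (n : Nat) : Nat → Nat → List (Int × Int × String) → List (Int × Int × String)
  | 0, _, acc => acc
  | fuel+1, i, acc =>
    if i < n then
      if pvEscAt t n i then pvMainA t n fuel (i+2) acc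
      else if t.getD i ' ' = '{' then
        match pvInnerA t n (n+1) (i+1) 1 with
        | some j => pvMainA t n fuel j
            (acc ++ [((i : Int), (j : Int),
              String.ofList (PySem.List.slice t (some ((i : Int) + 1)) (some ((j : Int) - 1))))])
        | none => pvMainA t n fuel (i+1) acc
      else pvMainA t n fuel (i+1) acc
    else acc

def scan_placeholders_py (text : String) : List (Int × Int × String) :=
  pvMainA text.toList text.toList.length (text.toList.length + 1) 0 []

-- ===== PORT B =====
-- Python's `while results and results[-1][0] > p: results.pop()`; results are kept newest-first
-- (Python appends/pops at the right end), reversed on return.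
def pvPopB (p : Int) : List (Int × Int × String) → List (Int × Int × String)
  | [] => []
  | x :: rest => if p < x.1 then pvPopB p rest else x :: rest

-- B's single `while i < n` loop over (position, open-brace stack, result stack)
def pvMainB (t : List Char) (n : Nat) : Nat → Nat → List Nat → List (Int × Int × String) → List (Int × Int × String)
  | 0, _, _, res => res
  | fuel+1, i, stack, res =>
    if i < n then
      if pvEscAt t n i then pvMainB t n fuel (i+2) stack res
      else if t.getD i ' ' = '{' then pvMainB t n fuel (i+1) (i :: stack) res
      else if t.getD i ' ' = '}' then
        match stack with
        | [] => pvMainB t n fuel (i+1) [] res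
        | p :: stack' =>
            pvMainB t n fuel (i+1) stack'
              (((p : Int), (i : Int) + 1,
                String.ofList (PySem.List.slice t (some ((p : Int) + 1)) (some (i : Int)))) :: pvPopB (p : Int) res)
      else pvMainB t n fuel (i+1) stack res
    else res

def scan_placeholders_py_alt (text : String) : List (Int × Int × String) :=
  (pvMainB text.toList text.toList.length (text.toList.length + 1) 0 [] []).reverse

-- ===== PRECONDITION & SPEC =====
def Spec_scan_placeholders_py (text : String) (out : List (Int × Int × String)) : Prop := out = scan_placeholders_py_alt text
instance (text : String) (out : List (Int × Int × String)) : Decidable (Spec_scan_placeholders_py text out) := by unfold Spec_scan_placeholders_py; infer_instance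

-- ===== CLAIM (what is proved, stated in full; the proofs are below) =====
def Claim_equal_scan_placeholders_py : Prop := ∀ (text : String), Dom_scan_placeholders_py text → Spec_scan_placeholders_py text (scan_placeholders_py text)

-- ===== LEMMAS AND PROOFS =====

-- sufficient-fuel wrappers used by the proofs
def Irun (t : List Char) (n j d : Nat) : Option Nat := pvInnerA t n (n+1) j d
def Arun (t : List Char) (n i : Nat) (acc : List (Int × Int × String)) : List (Int × Int × String) :=
  pvMainA t n (n+1) i acc
def Brun (t : List Char) (n i : Nat) (stack : List Nat) (res : List (Int × Int × String)) : List (Int × Int × String) :=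
  pvMainB t n (n+1) i stack res

-- fuel irrelevance
lemma innerA_fuel (t : List Char) (n : Nat) :
    ∀ f₁, ∀ {f₂ j d}, 0 < f₁ → 0 < f₂ → n < j + f₁ → n < j + f₂ →
      pvInnerA t n f₁ j d = pvInnerA t n f₂ j d := by
  intro f₁
  induction f₁ with
  | zero => intro f₂ j d h1 _ _ _; omega
  | succ f ih =>
    intro f₂ j d _ h2 hb1 hb2
    obtain ⟨f₂', rfl⟩ : ∃ k, f₂ = k + 1 := ⟨f₂ - 1, by omega⟩
    show pvInnerA t n (f+1) j d = pvInnerA t n (f₂'+1) j d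
    rw [pvInnerA, pvInnerA]
    by_cases hcond : j < n ∧ 0 < d
    · rw [if_pos hcond, if_pos hcond]
      have hj := hcond.1
      split_ifs with h h1 h2 <;>
        exact ih (by omega) (by omega) (by omega) (by omega)
    · rw [if_neg hcond, if_neg hcond]

lemma innerA_ge (t : List Char) (n : Nat) :
    ∀ f {j d k}, pvInnerA t n f j d = some k → j ≤ k := by
  intro f
  induction f with
  | zero => intro j d k h; simp [pvInnerA] at h
  | succ f ih =>
    intro j d k h
    rw [pvInnerA] at h
    by_cases hcond : j < n ∧ 0 < d
    · rw [if_pos hcond] at h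
      split_ifs at h with h1 h2 h3
      · have := ih h; omega
      · have := ih h; omega
      · have := ih h; omega
      · have := ih h; omega
    · rw [if_neg hcond] at h
      split_ifs at h with h1
      simp only [Option.some.injEq] at h
      omega

lemma mainA_fuel (t : List Char) (n : Nat) :
    ∀ f₁, ∀ {f₂ i acc}, 0 < f₁ → 0 < f₂ → n < i + f₁ → n < i + f₂ →
      pvMainA t n f₁ i acc = pvMainA t n f₂ i acc := by
  intro f₁
  induction f₁ with
  | zero => intro f₂ i acc h1 _ _ _; omega
  | succ f ih =>
    intro f₂ i acc _ h2 hb1 hb2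
    obtain ⟨f₂', rfl⟩ : ∃ k, f₂ = k + 1 := ⟨f₂ - 1, by omega⟩
    show pvMainA t n (f+1) i acc = pvMainA t n (f₂'+1) i acc
    rw [pvMainA, pvMainA]
    by_cases hi : i < n
    · rw [if_pos hi, if_pos hi]
      by_cases he : pvEscAt t n i = true
      · rw [if_pos he, if_pos he]
        exact ih (by omega) (by omega) (by omega) (by omega)
      · rw [if_neg he, if_neg he]
        by_cases hc : t.getD i ' ' = '{'
        · rw [if_pos hc, if_pos hc]
          cases hs : pvInnerA t n (n+1) (i+1) 1 with
          | none => dsimp only; exact ih (by omega) (by omega) (by omega) (by omega)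
          | some j =>
            dsimp only
            have hij : i + 1 ≤ j := innerA_ge t n _ hs
            exact ih (by omega) (by omega) (by omega) (by omega)
        · rw [if_neg hc, if_neg hc]
          exact ih (by omega) (by omega) (by omega) (by omega)
    · rw [if_neg hi, if_neg hi]

lemma mainB_fuel (t : List Char) (n : Nat) :
    ∀ f₁, ∀ {f₂ i stack res}, 0 < f₁ → 0 < f₂ → n < i + f₁ → n < i + f₂ →
      pvMainB t n f₁ i stack res = pvMainB t n f₂ i stack res := by
  intro f₁
  induction f₁ with
  | zero => intro f₂ i stack res h1 _ _ _; omega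
  | succ f ih =>
    intro f₂ i stack res _ h2 hb1 hb2
    obtain ⟨f₂', rfl⟩ : ∃ k, f₂ = k + 1 := ⟨f₂ - 1, by omega⟩
    show pvMainB t n (f+1) i stack res = pvMainB t n (f₂'+1) i stack res
    conv_lhs => rw [pvMainB.eq_def]
    conv_rhs => rw [pvMainB.eq_def]
    dsimp only
    by_cases hi : i < n
    · rw [if_pos hi, if_pos hi]
      by_cases he : pvEscAt t n i = true
      · rw [if_pos he, if_pos he]
        exact ih (by omega) (by omega) (by omega) (by omega)
      · rw [if_neg he, if_neg he]
        by_cases hc : t.getD i ' ' = '{'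
        · rw [if_pos hc, if_pos hc]
          exact ih (by omega) (by omega) (by omega) (by omega)
        · rw [if_neg hc, if_neg hc]
          by_cases hc2 : t.getD i ' ' = '}'
          · rw [if_pos hc2, if_pos hc2]
            cases stack with
            | nil => exact ih (by omega) (by omega) (by omega) (by omega)
            | cons p S => exact ih (by omega) (by omega) (by omega) (by omega)
          · rw [if_neg hc2, if_neg hc2]
            exact ih (by omega) (by omega) (by omega) (by omega)
    · rw [if_neg hi, if_neg hi]

lemma Irun_zero (t : List Char) (n j : Nat) : Irun t n j 0 = some j := by
  show pvInnerA t n (n+1) j 0 = some j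
  rw [pvInnerA]
  simp

lemma Irun_none_of_ge (t : List Char) {n j d : Nat} (h : ¬ j < n) (hd : 0 < d) :
    Irun t n j d = none := by
  show pvInnerA t n (n+1) j d = none
  rw [pvInnerA]
  rw [if_neg (by omega), if_neg (by omega)]

lemma Irun_esc (t : List Char) {n j : Nat} (d : Nat) (hj : j < n) (hd : 0 < d)
    (he : pvEscAt t n j = true) : Irun t n j d = Irun t n (j+2) d := by
  show pvInnerA t n (n+1) j d = _
  rw [pvInnerA, if_pos ⟨hj, hd⟩, if_pos he]
  exact innerA_fuel t n n (by omega) (by omega) (by omega) (by omega)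

lemma Irun_open (t : List Char) {n j : Nat} (d : Nat) (hj : j < n) (hd : 0 < d)
    (he : pvEscAt t n j = false) (hc : t.getD j ' ' = '{') :
    Irun t n j d = Irun t n (j+1) (d+1) := by
  show pvInnerA t n (n+1) j d = _
  rw [pvInnerA, if_pos ⟨hj, hd⟩, if_neg (by simp [he]), if_pos hc]
  exact innerA_fuel t n n (by omega) (by omega) (by omega) (by omega)

lemma Irun_close (t : List Char) {n j : Nat} (d : Nat) (hj : j < n) (hd : 0 < d)
    (he : pvEscAt t n j = false) (hc : t.getD j ' ' = '}') :
    Irun t n j d = Irun t n (j+1) (d-1) := by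
  show pvInnerA t n (n+1) j d = _
  have hc1 : ¬ t.getD j ' ' = '{' := by rw [hc]; decide
  rw [pvInnerA, if_pos ⟨hj, hd⟩, if_neg (by simp [he]), if_neg hc1, if_pos hc]
  exact innerA_fuel t n n (by omega) (by omega) (by omega) (by omega)

lemma Irun_other (t : List Char) {n j : Nat} (d : Nat) (hj : j < n) (hd : 0 < d)
    (he : pvEscAt t n j = false) (hc1 : ¬ t.getD j ' ' = '{') (hc2 : ¬ t.getD j ' ' = '}') :
    Irun t n j d = Irun t n (j+1) d := by
  show pvInnerA t n (n+1) j d = _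
  rw [pvInnerA, if_pos ⟨hj, hd⟩, if_neg (by simp [he]), if_neg hc1, if_neg hc2]
  exact innerA_fuel t n n (by omega) (by omega) (by omega) (by omega)

lemma Irun_ge (t : List Char) {n j d k : Nat} (h : Irun t n j d = some k) : j ≤ k :=
  innerA_ge t n _ h

lemma Irun_lt_of_some (t : List Char) {n j k : Nat} (h : Irun t n j 1 = some k) : j < n := by
  by_cases hj : j < n
  · exact hj
  · rw [Irun_none_of_ge t hj (by omega)] at h
    exact absurd h (by simp)

-- depth composition: scanning with one extra pending brace first closes the top one
lemma Irun_comp (t : List Char) (n : Nat) :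
    ∀ fuel j d, n < j + fuel →
      Irun t n j (d+1) = (Irun t n j 1).bind (fun m => Irun t n m d) := by
  intro fuel
  induction fuel with
  | zero =>
    intro j d hb
    rw [Irun_none_of_ge t (by omega) (by omega), Irun_none_of_ge t (by omega) (by omega)]
    rfl
  | succ f ih =>
    intro j d hb
    by_cases hj : j < n
    · by_cases he : pvEscAt t n j = true
      · rw [Irun_esc t (d+1) hj (by omega) he, Irun_esc t 1 hj (by omega) he]
        exact ih (j+2) d (by omega)
      · have he' : pvEscAt t n j = false := by simpa using he
        by_cases hc1 : t.getD j ' ' = '{'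
        · rw [Irun_open t (d+1) hj (by omega) he' hc1, Irun_open t 1 hj (by omega) he' hc1]
          rw [ih (j+1) (d+1) (by omega), ih (j+1) 1 (by omega)]
          cases hm : Irun t n (j+1) 1 with
          | none => rfl
          | some m =>
            simp only [Option.bind_some]
            have hm' : j + 1 ≤ m := Irun_ge t hm
            exact ih m d (by omega)
        · by_cases hc2 : t.getD j ' ' = '}'
          · rw [Irun_close t (d+1) hj (by omega) he' hc2, Irun_close t 1 hj (by omega) he' hc2]
            have e1 : d + 1 - 1 = d := by omega
            have e0 : (1 : Nat) - 1 = 0 := by omega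
            rw [e1, e0, Irun_zero]
            simp
          · rw [Irun_other t (d+1) hj (by omega) he' hc1 hc2, Irun_other t 1 hj (by omega) he' hc1 hc2]
            exact ih (j+1) d (by omega)
    · rw [Irun_none_of_ge t hj (by omega), Irun_none_of_ge t hj (by omega)]
      rfl

-- Arun step lemmas
lemma Arun_end (t : List Char) {n i : Nat} (h : ¬ i < n) (acc : List (Int × Int × String)) :
    Arun t n i acc = acc := by
  show pvMainA t n (n+1) i acc = acc
  rw [pvMainA, if_neg h]

lemma Arun_esc (t : List Char) {n i : Nat} (hj : i < n) (he : pvEscAt t n i = true)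
    (acc : List (Int × Int × String)) : Arun t n i acc = Arun t n (i+2) acc := by
  show pvMainA t n (n+1) i acc = _
  rw [pvMainA, if_pos hj, if_pos he]
  exact mainA_fuel t n n (by omega) (by omega) (by omega) (by omega)

lemma Arun_open_some (t : List Char) {n i j : Nat} (hj : i < n) (he : pvEscAt t n i = false)
    (hc : t.getD i ' ' = '{') (hs : Irun t n (i+1) 1 = some j) (acc : List (Int × Int × String)) :
    Arun t n i acc = Arun t n j (acc ++ [((i : Int), (j : Int),
      String.ofList (PySem.List.slice t (some ((i : Int) + 1)) (some ((j : Int) - 1))))]) := by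
  show pvMainA t n (n+1) i acc = _
  rw [pvMainA, if_pos hj, if_neg (by simp [he]), if_pos hc]
  have hs' : pvInnerA t n (n+1) (i+1) 1 = some j := hs
  rw [hs']
  dsimp only
  have hij : i + 1 ≤ j := innerA_ge t n _ hs'
  exact mainA_fuel t n n (by omega) (by omega) (by omega) (by omega)

lemma Arun_open_none (t : List Char) {n i : Nat} (hj : i < n) (he : pvEscAt t n i = false)
    (hc : t.getD i ' ' = '{') (hs : Irun t n (i+1) 1 = none) (acc : List (Int × Int × String)) :
    Arun t n i acc = Arun t n (i+1) acc := by
  show pvMainA t n (n+1) i acc = _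
  rw [pvMainA, if_pos hj, if_neg (by simp [he]), if_pos hc]
  have hs' : pvInnerA t n (n+1) (i+1) 1 = none := hs
  rw [hs']
  dsimp only
  exact mainA_fuel t n n (by omega) (by omega) (by omega) (by omega)

lemma Arun_other (t : List Char) {n i : Nat} (hj : i < n) (he : pvEscAt t n i = false)
    (hc : ¬ t.getD i ' ' = '{') (acc : List (Int × Int × String)) :
    Arun t n i acc = Arun t n (i+1) acc := by
  show pvMainA t n (n+1) i acc = _
  rw [pvMainA, if_pos hj, if_neg (by simp [he]), if_neg hc]
  exact mainA_fuel t n n (by omega) (by omega) (by omega) (by omega)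

lemma Arun_acc (t : List Char) (n : Nat) :
    ∀ f i acc, pvMainA t n f i acc = acc ++ pvMainA t n f i [] := by
  intro f
  induction f with
  | zero => intro i acc; simp [pvMainA]
  | succ f ih =>
    intro i acc
    rw [pvMainA]
    conv_rhs => rw [pvMainA]
    by_cases hi : i < n
    · rw [if_pos hi, if_pos hi]
      by_cases he : pvEscAt t n i = true
      · rw [if_pos he, if_pos he]; exact ih _ _
      · rw [if_neg he, if_neg he]
        by_cases hc : t.getD i ' ' = '{'
        · rw [if_pos hc, if_pos hc]
          cases hs : pvInnerA t n (n+1) (i+1) 1 with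
          | none => dsimp only; exact ih _ _
          | some j =>
            dsimp only
            rw [ih j (acc ++ [_]), ih j ([] ++ [_])]
            simp
        · rw [if_neg hc, if_neg hc]; exact ih _ _
    · rw [if_neg hi, if_neg hi]
      simp

-- Brun step lemmas
lemma Brun_end (t : List Char) {n i : Nat} (h : ¬ i < n) (S : List Nat) (R : List (Int × Int × String)) :
    Brun t n i S R = R := by
  show pvMainB t n (n+1) i S R = R
  conv_lhs => rw [pvMainB.eq_def]
  dsimp only
  rw [if_neg h]

lemma Brun_esc (t : List Char) {n i : Nat} (hj : i < n) (he : pvEscAt t n i = true)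
    (S : List Nat) (R : List (Int × Int × String)) : Brun t n i S R = Brun t n (i+2) S R := by
  show pvMainB t n (n+1) i S R = _
  conv_lhs => rw [pvMainB.eq_def]
  dsimp only
  rw [if_pos hj, if_pos he]
  exact mainB_fuel t n n (by omega) (by omega) (by omega) (by omega)

lemma Brun_push (t : List Char) {n i : Nat} (hj : i < n) (he : pvEscAt t n i = false)
    (hc : t.getD i ' ' = '{') (S : List Nat) (R : List (Int × Int × String)) :
    Brun t n i S R = Brun t n (i+1) (i :: S) R := by
  show pvMainB t n (n+1) i S R = _
  conv_lhs => rw [pvMainB.eq_def]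
  dsimp only
  rw [if_pos hj, if_neg (by simp [he]), if_pos hc]
  exact mainB_fuel t n n (by omega) (by omega) (by omega) (by omega)

lemma Brun_close (t : List Char) {n i : Nat} (hj : i < n) (he : pvEscAt t n i = false)
    (hc : t.getD i ' ' = '}') (p : Nat) (S : List Nat) (R : List (Int × Int × String)) :
    Brun t n i (p :: S) R = Brun t n (i+1) S
      (((p : Int), (i : Int) + 1,
        String.ofList (PySem.List.slice t (some ((p : Int) + 1)) (some (i : Int)))) :: pvPopB (p : Int) R) := by
  show pvMainB t n (n+1) i (p :: S) R = _
  conv_lhs => rw [pvMainB.eq_def]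
  dsimp only
  have hc1 : ¬ t.getD i ' ' = '{' := by rw [hc]; decide
  rw [if_pos hj, if_neg (by simp [he]), if_neg hc1, if_pos hc]
  exact mainB_fuel t n n (by omega) (by omega) (by omega) (by omega)

lemma Brun_close_nil (t : List Char) {n i : Nat} (hj : i < n) (he : pvEscAt t n i = false)
    (hc : t.getD i ' ' = '}') (R : List (Int × Int × String)) :
    Brun t n i [] R = Brun t n (i+1) [] R := by
  show pvMainB t n (n+1) i [] R = _
  conv_lhs => rw [pvMainB.eq_def]
  dsimp only
  have hc1 : ¬ t.getD i ' ' = '{' := by rw [hc]; decide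
  rw [if_pos hj, if_neg (by simp [he]), if_neg hc1, if_pos hc]
  exact mainB_fuel t n n (by omega) (by omega) (by omega) (by omega)

lemma Brun_other (t : List Char) {n i : Nat} (hj : i < n) (he : pvEscAt t n i = false)
    (hc1 : ¬ t.getD i ' ' = '{') (hc2 : ¬ t.getD i ' ' = '}') (S : List Nat) (R : List (Int × Int × String)) :
    Brun t n i S R = Brun t n (i+1) S R := by
  show pvMainB t n (n+1) i S R = _
  conv_lhs => rw [pvMainB.eq_def]
  dsimp only
  rw [if_pos hj, if_neg (by simp [he]), if_neg hc1, if_neg hc2]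
  exact mainB_fuel t n n (by omega) (by omega) (by omega) (by omega)

-- pvPopB facts
lemma popB_popB {p q : Int} (h : p ≤ q) (R : List (Int × Int × String)) :
    pvPopB p (pvPopB q R) = pvPopB p R := by
  induction R with
  | nil => rfl
  | cons x rest ih =>
    by_cases hx : q < x.1
    · have h1 : pvPopB q (x :: rest) = pvPopB q rest := by rw [pvPopB, if_pos hx]
      have h2 : pvPopB p (x :: rest) = pvPopB p rest := by rw [pvPopB, if_pos (by omega)]
      rw [h1, h2, ih]
    · have h1 : pvPopB q (x :: rest) = x :: rest := by rw [pvPopB, if_neg hx]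
      rw [h1]

lemma popB_eq_self {p : Int} {R : List (Int × Int × String)} (h : ∀ x ∈ R, x.1 ≤ p) :
    pvPopB p R = R := by
  cases R with
  | nil => rfl
  | cons x rest =>
    rw [pvPopB, if_neg (by have := h x (by simp); omega)]

lemma popB_cons_popB {p i : Int} (h : p < i) (y : Int × String) (R : List (Int × Int × String)) :
    pvPopB p ((i, y) :: pvPopB i R) = pvPopB p R := by
  rw [pvPopB, if_pos h]
  exact popB_popB (le_of_lt h) R

lemma Arun_acc' (t : List Char) (n i : Nat) (acc : List (Int × Int × String)) :
    Arun t n i acc = acc ++ Arun t n i [] := Arun_acc t n (n+1) i acc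

-- B consumes a balanced block [i, j) (one pending open at p) by closing p and discarding the
-- inner pairs it recorded inside it
lemma seg (t : List Char) (n : Nat) :
    ∀ fuel i j p S R, n < i + fuel → p < i → Irun t n i 1 = some j →
      Brun t n i (p :: S) R = Brun t n j S
        (((p : Int), (j : Int),
          String.ofList (PySem.List.slice t (some ((p : Int) + 1)) (some ((j : Int) - 1)))) :: pvPopB (p : Int) R) := by
  intro fuel
  induction fuel with
  | zero =>
    intro i j p S R hb hp hs
    exact absurd (Irun_lt_of_some t hs) (by omega)
  | succ f ih =>
    intro i j p S R hb hp hs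
    have hi : i < n := Irun_lt_of_some t hs
    by_cases he : pvEscAt t n i = true
    · rw [Irun_esc t 1 hi (by omega) he] at hs
      rw [Brun_esc t hi he]
      exact ih (i+2) j p S R (by omega) (by omega) hs
    · have he' : pvEscAt t n i = false := by simpa using he
      by_cases hc1 : t.getD i ' ' = '{'
      · rw [Irun_open t 1 hi (by omega) he' hc1, Irun_comp t n f (i+1) 1 (by omega)] at hs
        cases hm : Irun t n (i+1) 1 with
        | none => rw [hm] at hs; simp at hs
        | some m =>
          rw [hm] at hs
          simp only [Option.bind_some] at hs
          have him : i + 1 ≤ m := Irun_ge t hm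
          rw [Brun_push t hi he' hc1]
          rw [ih (i+1) m i (p :: S) R (by omega) (by omega) hm]
          rw [ih m j p S _ (by omega) (by omega) hs]
          rw [popB_cons_popB (show (p:Int) < (i:Int) by exact_mod_cast hp)]
      · by_cases hc2 : t.getD i ' ' = '}'
        · rw [Irun_close t 1 hi (by omega) he' hc2, show (1:Nat)-1 = 0 from rfl, Irun_zero] at hs
          have hj : j = i + 1 := by
            have := hs
            simp only [Option.some.injEq] at this
            omega
          subst hj
          rw [Brun_close t hi he' hc2 p S R]
          have e2 : ((i+1 : Nat) : Int) - 1 = (i : Int) := by push_cast; ring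
          have e1 : ((i+1 : Nat) : Int) = (i : Int) + 1 := by push_cast; ring
          rw [e2, e1]
        · rw [Irun_other t 1 hi (by omega) he' hc1 hc2] at hs
          rw [Brun_other t hi he' hc1 hc2]
          exact ih (i+1) j p S R (by omega) (by omega) hs

-- main invariant: while A is at top level, every open still on B's stack can never be closed
lemma main_inv (t : List Char) (n : Nat) :
    ∀ fuel i S R, n < i + fuel →
      (S = [] ∨ Irun t n i 1 = none) → (∀ x ∈ R, x.1 < (i : Int)) →
      Brun t n i S R = (Arun t n i []).reverse ++ R := by
  intro fuel
  induction fuel with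
  | zero =>
    intro i S R hb hinv hR
    rw [Brun_end t (by omega), Arun_end t (by omega)]
    simp
  | succ f ih =>
    intro i S R hb hinv hR
    by_cases hi : i < n
    · by_cases he : pvEscAt t n i = true
      · rw [Brun_esc t hi he, Arun_esc t hi he]
        refine ih (i+2) S R (by omega) ?_ ?_
        · rcases hinv with h | h
          · exact Or.inl h
          · rw [Irun_esc t 1 hi (by omega) he] at h
            exact Or.inr h
        · intro x hx
          have := hR x hx
          push_cast
          omega
      · have he' : pvEscAt t n i = false := by simpa using he
        by_cases hc1 : t.getD i ' ' = '{'
        · cases hm : Irun t n (i+1) 1 with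
          | none =>
            rw [Brun_push t hi he' hc1, Arun_open_none t hi he' hc1 hm]
            refine ih (i+1) (i :: S) R (by omega) (Or.inr hm) ?_
            intro x hx
            have := hR x hx
            push_cast
            omega
          | some j =>
            have him : i + 1 ≤ j := Irun_ge t hm
            rw [Brun_push t hi he' hc1]
            rw [seg t n f (i+1) j i S R (by omega) (by omega) hm]
            rw [popB_eq_self (fun x hx => le_of_lt (hR x hx))]
            rw [Arun_open_some t hi he' hc1 hm [], Arun_acc' t n j]
            have hinv' : S = [] ∨ Irun t n j 1 = none := by
              rcases hinv with h | h
              · exact Or.inl h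
              · rw [Irun_open t 1 hi (by omega) he' hc1,
                    Irun_comp t n f (i+1) 1 (by omega), hm] at h
                simp only [Option.bind_some] at h
                exact Or.inr h
            have hR' : ∀ x ∈ ((i : Int), (j : Int),
                String.ofList (PySem.List.slice t (some ((i : Int) + 1)) (some ((j : Int) - 1)))) :: R,
                x.1 < (j : Int) := by
              intro x hx
              rcases List.mem_cons.mp hx with rfl | hx
              · show (i : Int) < (j : Int)
                exact_mod_cast him
              · have := hR x hx
                push_cast at this ⊢
                omega
            rw [ih j S _ (by omega) hinv' hR']
            simp
        · by_cases hc2 : t.getD i ' ' = '}'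
          · rcases hinv with rfl | hnone
            · rw [Brun_close_nil t hi he' hc2, Arun_other t hi he' hc1]
              refine ih (i+1) [] R (by omega) (Or.inl rfl) ?_
              intro x hx
              have := hR x hx
              push_cast
              omega
            · exfalso
              rw [Irun_close t 1 hi (by omega) he' hc2, show (1:Nat)-1 = 0 from rfl,
                  Irun_zero] at hnone
              simp at hnone
          · rw [Brun_other t hi he' hc1 hc2, Arun_other t hi he' hc1]
            refine ih (i+1) S R (by omega) ?_ ?_
            · rcases hinv with h | h
              · exact Or.inl h
              · rw [Irun_other t 1 hi (by omega) he' hc1 hc2] at h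
                exact Or.inr h
            · intro x hx
              have := hR x hx
              push_cast
              omega
    · rw [Brun_end t hi, Arun_end t hi]
      simp

-- ===== VERDICT (by name: the statement is the Claim_ definition above) =====
theorem scan_placeholders_py_spec : Claim_equal_scan_placeholders_py := by
  intro text _
  unfold Spec_scan_placeholders_py scan_placeholders_py scan_placeholders_py_alt
  have h := main_inv text.toList text.toList.length (text.toList.length + 1) 0 [] []
    (by omega) (Or.inl rfl) (by simp)
  show Arun text.toList text.toList.length 0 [] = (Brun text.toList text.toList.length 0 [] []).reverse
  rw [h]
  simp
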